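-- pv_equiv track=rewrite | github.com/pi-poninc/document_search_bot | DocSearchApi/utils.py | chatHistoryToList
-- ===== SOURCE A (Python) =====
-- def chatHistoryToList(chat_history:list[dict]) -> list[tuple]:
--     chat_history_list = []
--     # chat_historyをuserとbotの組み合わせのタプルのリストに変換
--     # chat_history = [
--     #     { "user": "Hello" },
--     #     { "bot": "echo : Hello" },
--     #     { "user": "How are you?" }
--     # ]
--     # chat_history_list = [
--     #     ("Hello", "echo : Hello"),
--     #     ("How are you?", "")
--
--     chat_history_list = []
--     skip = False
--     for i, chat in enumerate(chat_history):
--         if skip: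
--             skip = False
--             continue
--         if "user" in chat:
--             if i+1 < len(chat_history):
--                 if "bot" in chat_history[i+1]:
--                     chat_history_list.append((chat["user"], chat_history[i+1]["bot"]))
--                     skip = True
--                 else:
--                     chat_history_list.append((chat["user"], ""))
--                     skip = False
--             else:
--                 chat_history_list.append((chat["user"], ""))
--                 skip = False
--
--     return chat_history_list
-- ===== SOURCE B (Python) =====
-- def chatHistoryToList(chat_history: list[dict]) -> list[tuple]:
--     result = []
--     pending_user = None
--     for chat in chat_history:
--         if pending_user is not None:
--             if "bot" in chat:
--                 result.append((pending_user, chat["bot"]))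
--                 pending_user = None
--                 continue  # the whole entry is consumed, even if it also has a "user" key
--             result.append((pending_user, ""))
--             pending_user = None
--         if "user" in chat:
--             pending_user = chat["user"]
--     if pending_user is not None:
--         result.append((pending_user, ""))
--     return result
-- ===== Notes on version B (the rewrite author's own statement) =====
-- stated objective: simpler
-- what changed: Replaced the index-based look-ahead (chat_history[i+1]) with a skip flag by a single forward pass that carries a pending user and pairs it with the next entry's bot (or flushes it with an empty bot), eliminating indexing and the skip state.
import Mathlib
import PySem

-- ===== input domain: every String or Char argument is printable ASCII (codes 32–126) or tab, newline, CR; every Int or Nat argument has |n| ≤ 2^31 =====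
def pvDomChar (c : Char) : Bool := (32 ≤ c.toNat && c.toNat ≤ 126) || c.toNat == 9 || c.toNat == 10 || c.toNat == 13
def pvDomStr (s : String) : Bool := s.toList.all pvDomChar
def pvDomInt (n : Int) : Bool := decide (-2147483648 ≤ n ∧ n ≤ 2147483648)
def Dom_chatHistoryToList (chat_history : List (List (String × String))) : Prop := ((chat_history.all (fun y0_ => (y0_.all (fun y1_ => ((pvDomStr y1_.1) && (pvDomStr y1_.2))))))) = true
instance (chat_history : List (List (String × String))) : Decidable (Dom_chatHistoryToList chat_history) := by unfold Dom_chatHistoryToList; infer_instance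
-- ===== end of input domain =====

-- B replaces A's index-based look-ahead-and-skip loop by a single forward pass carrying a
-- pending user (deferred-accumulator state machine); objective: simpler, same O(n) cost.

-- ===== PORT A =====
-- A's 'for i, chat in enumerate(chat_history)' with the skip flag, indexed look-ahead
-- chat_history[i+1] (pyGetD is exact here: every access is guarded by i+1 < len).
def pvAGo (ch : List (List (String × String))) (i : Nat) (skip : Bool)
    (acc : List (String × String)) : List (String × String) :=
  if _h : i < ch.length then
    let chat := PySem.List.pyGetD ch (i : Int) []
    if skip then
      pvAGo ch (i+1) false acc
    else if (chat.lookup "user").isSome then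
      if i + 1 < ch.length then
        let nxt := PySem.List.pyGetD ch ((i : Int) + 1) []
        if (nxt.lookup "bot").isSome then
          pvAGo ch (i+1) true
            (acc ++ [((chat.lookup "user").getD "", (nxt.lookup "bot").getD "")])
        else
          pvAGo ch (i+1) false (acc ++ [((chat.lookup "user").getD "", "")])
      else
        pvAGo ch (i+1) false (acc ++ [((chat.lookup "user").getD "", "")])
    else
      pvAGo ch (i+1) skip acc
  else acc
termination_by ch.length - i

def chatHistoryToList (chat_history : List (List (String × String))) : List (String × String) :=
  pvAGo chat_history 0 false []

-- ===== PORT B =====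
-- Source B's loop: one pass over the entries, state = (pending_user, result-so-far).
def pvBGo (pending : Option String) (rest : List (List (String × String)))
    (acc : List (String × String)) : List (String × String) :=
  match rest with
  | [] =>
    match pending with
    | some u => acc ++ [(u, "")]
    | none => acc
  | chat :: rest' =>
    match pending with
    | some u =>
      match chat.lookup "bot" with
      | some bv => pvBGo none rest' (acc ++ [(u, bv)])
      | none =>
        match chat.lookup "user" with
        | some uv => pvBGo (some uv) rest' (acc ++ [(u, "")])
        | none => pvBGo none rest' (acc ++ [(u, "")])
    | none =>
      match chat.lookup "user" with
      | some uv => pvBGo (some uv) rest' acc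
      | none => pvBGo none rest' acc

def chatHistoryToList_alt (chat_history : List (List (String × String))) : List (String × String) :=
  pvBGo none chat_history []

-- ===== PRECONDITION & SPEC =====
def Spec_chatHistoryToList (chat_history : List (List (String × String))) (out : List (String × String)) : Prop := out = chatHistoryToList_alt chat_history
instance (chat_history : List (List (String × String))) (out : List (String × String)) : Decidable (Spec_chatHistoryToList chat_history out) := by unfold Spec_chatHistoryToList; infer_instance

-- ===== CLAIM (what is proved, stated in full; the proofs are below) =====
def Claim_equal_chatHistoryToList : Prop := ∀ (chat_history : List (List (String × String))), Dom_chatHistoryToList chat_history → Spec_chatHistoryToList chat_history (chatHistoryToList chat_history)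

-- ===== LEMMAS AND PROOFS =====

-- Common specification: the result as a non-accumulating recursion on the list of entries.
def pvSpecF : List (List (String × String)) → List (String × String)
  | [] => []
  | chat :: rest =>
    if (chat.lookup "user").isSome then
      match rest with
      | nxt :: rest' =>
        if (nxt.lookup "bot").isSome then
          ((chat.lookup "user").getD "", (nxt.lookup "bot").getD "") :: pvSpecF rest'
        else
          ((chat.lookup "user").getD "", "") :: pvSpecF (nxt :: rest')
      | [] => [((chat.lookup "user").getD "", "")]
    else pvSpecF rest
termination_by l => l.length
decreasing_by all_goals simp

theorem pvSpecF_nil : pvSpecF [] = [] := by simp [pvSpecF]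

theorem pvSpecF_noUser (c : List (String × String)) (r : List (List (String × String)))
    (hc : c.lookup "user" = none) : pvSpecF (c :: r) = pvSpecF r := by
  rw [pvSpecF.eq_def]; simp [hc]

theorem pvSpecF_user_last (c : List (String × String)) (uv : String)
    (hc : c.lookup "user" = some uv) : pvSpecF [c] = [(uv, "")] := by
  rw [pvSpecF.eq_def]; simp [hc]

theorem pvSpecF_user_bot (c nxt : List (String × String)) (uv bv : String)
    (r' : List (List (String × String))) (hc : c.lookup "user" = some uv)
    (hb : nxt.lookup "bot" = some bv) :
    pvSpecF (c :: nxt :: r') = (uv, bv) :: pvSpecF r' := by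
  rw [pvSpecF.eq_def]; simp [hc, hb]

theorem pvSpecF_user_noBot (c nxt : List (String × String)) (uv : String)
    (r' : List (List (String × String))) (hc : c.lookup "user" = some uv)
    (hb : nxt.lookup "bot" = none) :
    pvSpecF (c :: nxt :: r') = (uv, "") :: pvSpecF (nxt :: r') := by
  rw [pvSpecF.eq_def]; simp [hc, hb]

-- What bGo computes from a pending user, in terms of pvSpecF.
def pvSpecP (u : String) : List (List (String × String)) → List (String × String)
  | [] => [(u, "")]
  | nxt :: rest' =>
    if (nxt.lookup "bot").isSome then
      (u, (nxt.lookup "bot").getD "") :: pvSpecF rest'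
    else
      (u, "") :: pvSpecF (nxt :: rest')

-- pvSpecP describes pvSpecF of a pure-user entry followed by the rest.
theorem pvSpecP_eq (c : List (String × String)) (uv : String)
    (r : List (List (String × String))) (hc : c.lookup "user" = some uv) :
    pvSpecF (c :: r) = pvSpecP uv r := by
  match r with
  | [] => rw [pvSpecF_user_last c uv hc]; simp [pvSpecP]
  | nxt :: r' =>
    rcases hb : nxt.lookup "bot" with _ | bv
    · rw [pvSpecF_user_noBot c nxt uv r' hc hb]; simp [pvSpecP, hb]
    · rw [pvSpecF_user_bot c nxt uv bv r' hc hb]; simp [pvSpecP, hb]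

theorem pv_bGo_spec (n : Nat) :
    ∀ l : List (List (String × String)), l.length ≤ n →
      (∀ acc, pvBGo none l acc = acc ++ pvSpecF l) ∧
      (∀ u acc, pvBGo (some u) l acc = acc ++ pvSpecP u l) := by
  induction n with
  | zero =>
    intro l hl
    have : l = [] := List.length_eq_zero_iff.mp (Nat.le_zero.mp hl)
    subst this
    exact ⟨fun acc => by simp [pvBGo, pvSpecF_nil],
           fun u acc => by simp [pvBGo, pvSpecP]⟩
  | succ n ih =>
    intro l hl
    match l with
    | [] =>
      exact ⟨fun acc => by simp [pvBGo, pvSpecF_nil],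
             fun u acc => by simp [pvBGo, pvSpecP]⟩
    | chat :: rest =>
      have hr : rest.length ≤ n := by simp at hl; omega
      constructor
      · intro acc
        rcases hc : chat.lookup "user" with _ | uv
        · simp only [pvBGo, hc]
          rw [(ih rest hr).1 acc, pvSpecF_noUser chat rest hc]
        · simp only [pvBGo, hc]
          rw [(ih rest hr).2 uv acc, pvSpecP_eq chat uv rest hc]
      · intro u acc
        rcases hb : chat.lookup "bot" with _ | bv
        · rcases hc : chat.lookup "user" with _ | uv
          · simp only [pvBGo, hb, hc]
            rw [(ih rest hr).1 (acc ++ [(u, "")])]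
            simp [pvSpecP, hb, pvSpecF_noUser chat rest hc]
          · simp only [pvBGo, hb, hc]
            rw [(ih rest hr).2 uv (acc ++ [(u, "")]),
              ← pvSpecP_eq chat uv rest hc]
            simp [pvSpecP, hb]
        · simp only [pvBGo, hb]
          rw [(ih rest hr).1 (acc ++ [(u, bv)])]
          simp [pvSpecP, hb]

theorem pv_aGo_skip (ch : List (List (String × String))) (i : Nat) (hi : i < ch.length) (acc : List (String × String)) :
    pvAGo ch i true acc = pvAGo ch (i+1) false acc := by
  rw [pvAGo]
  simp [hi]

theorem pv_aGo_spec (ch : List (List (String × String))) (n : Nat) :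
    ∀ l : List (List (String × String)), l.length ≤ n → ∀ i : Nat, ch.drop i = l → ∀ acc,
      pvAGo ch i false acc = acc ++ pvSpecF l := by
  induction n with
  | zero =>
    intro l hl i hdrop acc
    have hnil : l = [] := List.length_eq_zero_iff.mp (Nat.le_zero.mp hl)
    subst hnil
    have hge : ch.length ≤ i := List.drop_eq_nil_iff.mp hdrop
    rw [pvAGo]
    simp [Nat.not_lt.mpr hge, pvSpecF_nil]
  | succ n ih =>
    intro l hl i hdrop acc
    match l with
    | [] =>
      have hge : ch.length ≤ i := List.drop_eq_nil_iff.mp hdrop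
      rw [pvAGo]
      simp [Nat.not_lt.mpr hge, pvSpecF_nil]
    | chat :: rest =>
      have hi : i < ch.length := by
        by_contra h
        rw [List.drop_eq_nil_of_le (Nat.not_lt.mp h)] at hdrop
        exact absurd hdrop (by simp)
      have hcons := List.drop_eq_getElem_cons (l := ch) (i := i) hi
      rw [hdrop] at hcons
      injection hcons.symm with hchat hdrop'
      have hget : PySem.List.pyGetD ch (i : Int) [] = chat := by
        rw [PySem.List.pyGetD_eq_getElem ch [] (by positivity) (by exact_mod_cast hi)]
        simpa using hchat
      have hr : rest.length ≤ n := by simp at hl; omega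
      rw [pvAGo]
      simp only [hi, dif_pos, if_false, Bool.false_eq_true, hget]
      rcases hc : chat.lookup "user" with _ | uv
      · simp only [Option.isSome_none, Bool.false_eq_true, if_false]
        rw [ih rest hr (i+1) hdrop' acc, pvSpecF_noUser chat rest hc]
      · simp only [Option.isSome_some, if_true]
        match rest with
        | [] =>
          have hlen : ¬ (i + 1 < ch.length) :=
            Nat.not_lt.mpr (List.drop_eq_nil_iff.mp hdrop')
          simp only [hlen, if_false]
          rw [ih [] (by simp) (i+1) hdrop']
          rw [pvSpecF_nil, pvSpecF_user_last chat uv hc]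
          simp
        | nxt :: rest' =>
          have hi1 : i + 1 < ch.length := by
            by_contra h
            rw [List.drop_eq_nil_of_le (Nat.not_lt.mp h)] at hdrop'
            exact absurd hdrop' (by simp)
          have hcons' := List.drop_eq_getElem_cons (l := ch) (i := i+1) hi1
          rw [hdrop'] at hcons'
          injection hcons'.symm with hnxt hdrop''
          have hdrop2 : ch.drop (i+2) = rest' := hdrop''
          have hget' : PySem.List.pyGetD ch ((i : Int) + 1) [] = nxt := by
            rw [show ((i : Int) + 1) = ((i + 1 : Nat) : Int) by push_cast; ring]
            rw [PySem.List.pyGetD_eq_getElem ch [] (by positivity) (by exact_mod_cast hi1)]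
            simpa using hnxt
          simp only [hi1, if_true, hget']
          rcases hb : nxt.lookup "bot" with _ | bv
          · simp only [Option.isSome_none, Bool.false_eq_true, if_false]
            rw [ih (nxt :: rest') hr (i+1) hdrop']
            rw [pvSpecF_user_noBot chat nxt uv rest' hc hb]
            simp
          · simp only [Option.isSome_some, if_true]
            rw [pv_aGo_skip ch (i+1) hi1]
            have hr' : rest'.length ≤ n := by simp at hl; omega
            rw [show i + 1 + 1 = i + 2 from rfl, ih rest' hr' (i+2) hdrop2]
            rw [pvSpecF_user_bot chat nxt uv bv rest' hc hb]
            simp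

-- ===== VERDICT (by name: the statement is the Claim_ definition above) =====
theorem chatHistoryToList_spec : Claim_equal_chatHistoryToList := by
  intro ch _
  unfold Spec_chatHistoryToList chatHistoryToList chatHistoryToList_alt
  rw [pv_aGo_spec ch ch.length ch (le_refl _) 0 (by simp) [],
    (pv_bGo_spec ch.length ch (le_refl _)).1 []]
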